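-- pv_equiv track=rewrite | github.com/wzygxr/shuati | class173_SqrtDecompositionAndMoAlgorithm/edge_divider.py | _count_leq_k_paths
-- ===== SOURCE A (Python) =====
-- from typing import List, Dict, Set, Tuple
--
-- def _count_leq_k_paths(list1: List[int], list2: List[int], k: int) -> int:
--     """
--     统计两个距离列表中满足距离之和<=k的对数
--
--     Args:
--         list1: 第一个距离列表
--         list2: 第二个距离列表
--         k: 目标值
--
--     Returns:
--         符合条件的对数
--     """
--     # 排序两个列表以便快速统计
--     list1.sort()
--     list2.sort()
--
--     count = 0
--     j = len(list2) - 1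
--
--     # 双指针统计
--     for i in range(len(list1)):
--         while j >= 0 and list1[i] + list2[j] > k:
--             j -= 1
--         count += (j + 1)
--
--     return count
-- ===== SOURCE B (Python) =====
-- import bisect
--
-- def _count_leq_k_paths(list1, list2, k):
--     # Sort both lists in place (same mutation as the original), then for each
--     # element of list1 binary-search how many elements of list2 keep the sum <= k.
--     list1.sort()
--     list2.sort()
--     total = 0
--     for x in list1:
--         total += bisect.bisect_right(list2, k - x)
--     return total
-- ===== Notes on version B (the rewrite author's own statement) =====
-- stated objective: idiomatic
-- what changed: Replaces the single amortized two-pointer sweep (a mutable j shared across iterations of the outer loop) by sorting plus an independent bisect_right binary search per element of list1; both arguments are still sorted in place.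
import Mathlib
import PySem

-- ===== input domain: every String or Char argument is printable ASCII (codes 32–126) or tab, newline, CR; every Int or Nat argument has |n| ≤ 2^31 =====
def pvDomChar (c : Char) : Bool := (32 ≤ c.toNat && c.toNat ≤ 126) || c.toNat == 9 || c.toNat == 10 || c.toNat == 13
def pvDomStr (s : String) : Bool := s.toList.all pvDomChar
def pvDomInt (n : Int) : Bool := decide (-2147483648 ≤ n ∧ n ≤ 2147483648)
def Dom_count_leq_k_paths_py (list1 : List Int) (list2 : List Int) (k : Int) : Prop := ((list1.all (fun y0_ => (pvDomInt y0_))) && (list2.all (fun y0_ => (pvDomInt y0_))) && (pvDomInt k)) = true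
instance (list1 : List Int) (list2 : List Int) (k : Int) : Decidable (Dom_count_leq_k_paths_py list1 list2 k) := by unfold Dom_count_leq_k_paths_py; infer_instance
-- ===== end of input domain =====

-- B replaces A's shared two-pointer sweep by an independent bisect_right binary search
-- per element of list1 (idiomatic sorting + bisect); return values proved equal — both
-- Pythons also sort their list arguments in place, an identical side effect.

-- ===== PORT A =====
-- the inner 'while j >= 0 and list1[i] + list2[j] > k: j -= 1', with m = j + 1 : Nat
def pvShrinkA (s2 : List Int) (k x : Int) : Nat → Nat
  | 0 => 0
  | m + 1 => if k < x + s2.getD m 0 then pvShrinkA s2 k x m else m + 1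

-- the outer 'for i in range(len(list1))' loop, state (m = j + 1, count)
def pvGoA (s2 : List Int) (k : Int) : List Int → Nat → Int → Int
  | [], _, count => count
  | x :: rest, m, count =>
      let m' := pvShrinkA s2 k x m
      pvGoA s2 k rest m' (count + (m' : Int))

def count_leq_k_paths_py (list1 : List Int) (list2 : List Int) (k : Int) : Int :=
  let s1 := PySem.List.sorted list1 (fun y => y)
  let s2 := PySem.List.sorted list2 (fun y => y)
  pvGoA s2 k s1 s2.length 0

-- ===== PORT B =====
def count_leq_k_paths_py_alt (list1 : List Int) (list2 : List Int) (k : Int) : Int :=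
  let s1 := PySem.List.sorted list1 (fun y => y)
  let s2 := PySem.List.sorted list2 (fun y => y)
  s1.foldl (fun total x => total + ((PySem.List.bisectRight s2 (k - x) : Nat) : Int)) 0

-- ===== PRECONDITION & SPEC =====
def Spec_count_leq_k_paths_py (list1 : List Int) (list2 : List Int) (k : Int) (out : Int) : Prop := out = count_leq_k_paths_py_alt list1 list2 k
instance (list1 : List Int) (list2 : List Int) (k : Int) (out : Int) : Decidable (Spec_count_leq_k_paths_py list1 list2 k out) := by unfold Spec_count_leq_k_paths_py; infer_instance

-- ===== CLAIM (what is proved, stated in full; the proofs are below) =====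
def Claim_equal_count_leq_k_paths_py : Prop := ∀ (list1 : List Int) (list2 : List Int) (k : Int), Dom_count_leq_k_paths_py list1 list2 k → Spec_count_leq_k_paths_py list1 list2 k (count_leq_k_paths_py list1 list2 k)

-- ===== LEMMAS AND PROOFS =====

-- A's shrunken pointer equals bisect_right, given the loop invariant that everything
-- at or above m is already too large for the current x.
lemma pvShrinkA_eq_bisectRight (s2 : List Int) (k x : Int)
    (hs : s2.Pairwise (· ≤ ·)) :
    ∀ m, m ≤ s2.length →
      (∀ j (hj : j < s2.length), m ≤ j → k < x + s2[j]) →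
      pvShrinkA s2 k x m = PySem.List.bisectRight s2 (k - x) := by
  intro m
  induction m with
  | zero =>
      intro _ hup
      obtain ⟨hble, hlt, _⟩ := PySem.List.bisectRight_spec s2 (k - x) hs
      by_contra hne
      have hpos : 0 < PySem.List.bisectRight s2 (k - x) := by
        cases Nat.eq_zero_or_pos (PySem.List.bisectRight s2 (k - x)) with
        | inl h => simp [pvShrinkA, h] at hne
        | inr h => exact h
      have h0 : (0 : Nat) < s2.length := lt_of_lt_of_le hpos hble
      have := hlt 0 h0 hpos
      have := hup 0 h0 (Nat.zero_le _)
      omega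
  | succ m ih =>
      intro hm hup
      have hmlt : m < s2.length := hm
      have hgetD : s2.getD m 0 = s2[m] := List.getD_eq_getElem s2 0 hmlt
      obtain ⟨hble, hlo, hhi⟩ := PySem.List.bisectRight_spec s2 (k - x) hs
      by_cases hc : k < x + s2.getD m 0
      · rw [pvShrinkA, if_pos hc]
        apply ih (Nat.le_of_lt hmlt)
        intro j hj hmj
        rcases Nat.lt_or_ge j (m + 1) with h | h
        · have : j = m := by omega
          subst this; rw [hgetD] at hc; exact hc
        · exact hup j hj h
      · rw [pvShrinkA, if_neg hc]
        rw [hgetD] at hc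
        push Not at hc
        -- b ≤ m + 1 : otherwise s2[m+1] ≤ k - x contradicts hup at m+1
        have hub : PySem.List.bisectRight s2 (k - x) ≤ m + 1 := by
          by_contra h
          push Not at h
          have hj : m + 1 < s2.length := lt_of_lt_of_le h hble
          have := hlo (m + 1) hj h
          have := hup (m + 1) hj (Nat.le_refl _)
          omega
        -- m + 1 ≤ b : otherwise k - x < s2[m] contradicts hc
        have hlb : m + 1 ≤ PySem.List.bisectRight s2 (k - x) := by
          by_contra h
          push Not at h
          have := hhi m hmlt (by omega)
          omega
        omega

-- the outer loop of A equals B's fold, carrying the invariant and sortedness of s1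
lemma pvGoA_eq_fold (s2 : List Int) (k : Int) (hs : s2.Pairwise (· ≤ ·)) :
    ∀ (s1 : List Int) (m : Nat) (count : Int), s1.Pairwise (· ≤ ·) →
      m ≤ s2.length →
      (∀ x ∈ s1, ∀ j (hj : j < s2.length), m ≤ j → k < x + s2[j]) →
      pvGoA s2 k s1 m count
        = s1.foldl (fun total x => total + ((PySem.List.bisectRight s2 (k - x) : Nat) : Int)) count := by
  intro s1
  induction s1 with
  | nil => intro m count _ _ _; rfl
  | cons x rest ih =>
      intro m count hp hm hup
      have hx : pvShrinkA s2 k x m = PySem.List.bisectRight s2 (k - x) :=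
        pvShrinkA_eq_bisectRight s2 k x hs m hm (hup x (List.mem_cons_self))
      obtain ⟨hble, _, hhi⟩ := PySem.List.bisectRight_spec s2 (k - x) hs
      have hxle : ∀ y ∈ rest, x ≤ y := (List.pairwise_cons.mp hp).1
      simp only [pvGoA, List.foldl_cons, hx]
      apply ih _ _ (List.pairwise_cons.mp hp).2 (hx ▸ hble)
      intro y hy j hj hmj
      have h1 := hhi j hj hmj
      have h2 := hxle y hy
      omega

-- ===== VERDICT (by name: the statement is the Claim_ definition above) =====
theorem count_leq_k_paths_py_spec : Claim_equal_count_leq_k_paths_py := by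
  intro list1 list2 k _
  unfold Spec_count_leq_k_paths_py count_leq_k_paths_py count_leq_k_paths_py_alt
  exact pvGoA_eq_fold _ k (PySem.List.sorted_pairwise list2 (fun y => y)) _ _ 0
    (PySem.List.sorted_pairwise list1 (fun y => y)) (Nat.le_refl _)
    (fun _ _ j hj hmj => absurd hj (by omega))
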